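-- pv_equiv track=rewrite | github.com/Dechhi/lab | лаба 1 матрица.py | matrix_operations
-- ===== SOURCE A (Python) =====
-- def transpose(matrix):
--     N = len(matrix)
--     return [[matrix[j][i] for j in range(N)] for i in range(N)]
--
-- def matrix_operations(K, A, F):
--     N = len(A)
--
--     # Вычисляем K * F
--     KF = [[K * F[i][j] for j in range(N)] for i in range(N)]
--
--     # Вычисляем A^T
--     AT = transpose(A)
--
--     # Вычисляем K * A^T
--     KAT = [[K * AT[i][j] for j in range(N)] for i in range(N)]
--
--     # Вычисляем (K * F) * A
--     KFA = [[0] * N for _ in range(N)]  # Инициализируем результирующую матрицу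
--     for i in range(N):
--         for j in range(N):
--             KFA[i][j] = sum(KF[i][k] * A[k][j] for k in range(N))
--
--     # Вычисляем (K * F) * A - K * A^T
--     result_matrix = [[KFA[i][j] - KAT[i][j] for j in range(N)] for i in range(N)]
--
--     return result_matrix
-- ===== SOURCE B (Python) =====
-- def matrix_operations(K, A, F):
--     # Linear-combination-of-rows: row i of the result is built as a vector
--     # accumulator acc = sum_k (K*F[i][k]) * (row k of A), then K*(column i of A)
--     # is subtracted componentwise; no per-entry dot products, no staged matrices.
--     N = len(A)
--     result = []
--     for i in range(N):
--         acc = [0] * N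
--         for c, arow in zip(F[i][:N], A):
--             kc = K * c
--             acc = [s + kc * a for s, a in zip(acc, arow[:N])]
--         result.append([s - K * row[i] for s, row in zip(acc, A)])
--     return result
-- ===== Notes on version B (the rewrite author's own statement) =====
-- stated objective: alternative
-- what changed: B builds each output row as a vector accumulator: a linear combination of the rows of A with coefficients K*F[i][k] (ikj order over zipped rows), then subtracts K times the i-th column of A componentwise, instead of A's five staged matrices and per-entry dot products.
import Mathlib
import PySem

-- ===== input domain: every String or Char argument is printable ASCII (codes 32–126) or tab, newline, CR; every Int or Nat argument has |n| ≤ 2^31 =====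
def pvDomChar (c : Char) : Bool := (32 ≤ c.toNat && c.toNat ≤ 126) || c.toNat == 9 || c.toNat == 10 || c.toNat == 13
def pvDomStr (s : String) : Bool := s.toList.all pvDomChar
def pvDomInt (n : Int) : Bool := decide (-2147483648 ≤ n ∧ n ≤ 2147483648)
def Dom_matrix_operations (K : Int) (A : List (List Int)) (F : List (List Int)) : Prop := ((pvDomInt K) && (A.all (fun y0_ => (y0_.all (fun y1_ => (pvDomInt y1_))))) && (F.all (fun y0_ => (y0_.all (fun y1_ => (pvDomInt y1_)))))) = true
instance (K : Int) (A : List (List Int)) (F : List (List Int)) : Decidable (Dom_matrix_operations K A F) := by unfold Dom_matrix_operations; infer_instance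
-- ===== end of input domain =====

-- B builds each output row as a linear combination of the rows of A (vector accumulator)
-- instead of A's five staged matrices with per-entry dot products; equivalence proved on
-- square inputs (Pre_ excludes ragged/too-short matrices, where the Python A raises IndexError).

-- shared indexing helper of the A port: m[i][j] for in-range indices (exact there;
-- out-of-range is IndexError in Python and is excluded by Pre_)
def pvAt (m : List (List Int)) (i j : Nat) : Int := (m.getD i []).getD j 0

-- ===== PORT A =====
def pvTranspose (m : List (List Int)) : List (List Int) :=
  let N := m.length
  (List.range N).map (fun i => (List.range N).map (fun j => pvAt m j i))

def matrix_operations (K : Int) (A : List (List Int)) (F : List (List Int)) : List (List Int) :=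
  let N := A.length
  let KF := (List.range N).map (fun i => (List.range N).map (fun j => K * pvAt F i j))
  let AT := pvTranspose A
  let KAT := (List.range N).map (fun i => (List.range N).map (fun j => K * pvAt AT i j))
  let KFA := (List.range N).map (fun i => (List.range N).map (fun j =>
      ((List.range N).map (fun k => pvAt KF i k * pvAt A k j)).sum))
  (List.range N).map (fun i => (List.range N).map (fun j => pvAt KFA i j - pvAt KAT i j))

-- ===== PORT B =====
def matrix_operations_alt (K : Int) (A : List (List Int)) (F : List (List Int)) : List (List Int) :=
  let N := A.length
  (List.range N).map (fun i =>
    let acc := (((F.getD i []).take N).zip A).foldl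
      (fun acc p =>
        let kc := K * p.1
        (acc.zip (p.2.take N)).map (fun q => q.1 + kc * q.2))
      (List.replicate N 0)
    (acc.zip A).map (fun q => q.1 - K * (q.2.getD i 0)))

-- ===== PRECONDITION & SPEC =====
-- Pre_: exactly the inputs where Python A returns: every row of A has at least N = len(A)
-- entries, F has at least N rows and its first N rows have at least N entries each.
def Pre_matrix_operations (_K : Int) (A : List (List Int)) (F : List (List Int)) : Prop :=
  (∀ r ∈ A, A.length ≤ r.length) ∧ A.length ≤ F.length ∧ (∀ r ∈ F.take A.length, A.length ≤ r.length)
instance (K : Int) (A : List (List Int)) (F : List (List Int)) : Decidable (Pre_matrix_operations K A F) := by unfold Pre_matrix_operations; infer_instance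
def pvWitness_matrix_operations : Int × List (List Int) × List (List Int) := (2, [[1,2],[3,4]], [[5,6],[7,8]])

def Spec_matrix_operations (K : Int) (A : List (List Int)) (F : List (List Int)) (out : List (List Int)) : Prop := out = matrix_operations_alt K A F
instance (K : Int) (A : List (List Int)) (F : List (List Int)) (out : List (List Int)) : Decidable (Spec_matrix_operations K A F out) := by unfold Spec_matrix_operations; infer_instance

-- ===== CLAIM (what is proved, stated in full; the proofs are below) =====
def Claim_equal_matrix_operations : Prop := ∀ (K : Int) (A : List (List Int)) (F : List (List Int)), Dom_matrix_operations K A F → Pre_matrix_operations K A F → Spec_matrix_operations K A F (matrix_operations K A F)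

-- ===== LEMMAS AND PROOFS =====

-- closed form both ports are proved equal to
def pvEntry (K : Int) (A F : List (List Int)) (i j : Nat) : Int :=
  ((List.range A.length).map (fun k => (K * pvAt F i k) * pvAt A k j)).sum - K * pvAt A j i

theorem getD_range_map {α : Type} (f : Nat → α) (N i : Nat) (d : α) (h : i < N) :
    (((List.range N).map f).getD i d) = f i := by
  simp [List.getD_eq_getElem?_getD, h]

-- A-side: entry (i,j) of the A port is pvEntry
theorem matrixA_entry (K : Int) (A F : List (List Int)) :
    matrix_operations K A F =
      (List.range A.length).map (fun i => (List.range A.length).map (fun j => pvEntry K A F i j)) := by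
  unfold matrix_operations pvTranspose pvEntry
  simp only
  apply List.map_congr_left
  intro i hi
  have hi' : i < A.length := List.mem_range.mp hi
  apply List.map_congr_left
  intro j hj
  have hj' : j < A.length := List.mem_range.mp hj
  rw [show pvAt ((List.range A.length).map (fun i => (List.range A.length).map (fun j =>
        ((List.range A.length).map (fun k => pvAt ((List.range A.length).map (fun i =>
          (List.range A.length).map (fun j => K * pvAt F i j))) i k * pvAt A k j)).sum))) i j
      = ((List.range A.length).map (fun k => pvAt ((List.range A.length).map (fun i =>
          (List.range A.length).map (fun j => K * pvAt F i j))) i k * pvAt A k j)).sum from by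
        unfold pvAt; rw [getD_range_map _ _ _ _ hi', getD_range_map _ _ _ _ hj']]
  rw [show pvAt ((List.range A.length).map (fun i => (List.range A.length).map (fun j =>
        K * pvAt ((List.range A.length).map (fun i => (List.range A.length).map
          (fun j => pvAt A j i))) i j))) i j
      = K * pvAt ((List.range A.length).map (fun i => (List.range A.length).map
          (fun j => pvAt A j i))) i j from by
        unfold pvAt; rw [getD_range_map _ _ _ _ hi', getD_range_map _ _ _ _ hj']]
  rw [show pvAt ((List.range A.length).map (fun i => (List.range A.length).map
        (fun j => pvAt A j i))) i j = pvAt A j i from by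
        unfold pvAt; rw [getD_range_map _ _ _ _ hi', getD_range_map _ _ _ _ hj']]
  congr 1
  congr 1
  apply List.map_congr_left
  intro k hk
  have hk' : k < A.length := List.mem_range.mp hk
  have : pvAt ((List.range A.length).map (fun i => (List.range A.length).map
      (fun j => K * pvAt F i j))) i k = K * pvAt F i k := by
    unfold pvAt; rw [getD_range_map _ _ _ _ hi', getD_range_map _ _ _ _ hk']
  rw [this]

-- B-side invariant: entry j of the vector-accumulator fold
theorem fold_entry (K : Int) (N : Nat) :
    ∀ (ps : List (Int × List Int)) (acc : List Int), acc.length = N →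
      (∀ p ∈ ps, N ≤ p.2.length) → ∀ j, j < N →
      ((ps.foldl (fun acc p =>
          (acc.zip (p.2.take N)).map (fun q => q.1 + (K * p.1) * q.2)) acc).getD j 0)
        = acc.getD j 0 + (ps.map (fun p => (K * p.1) * (p.2.getD j 0))).sum := by
  intro ps
  induction ps with
  | nil => intro acc _ _ j _; simp
  | cons hd tl ih =>
    intro acc hlen hrows j hj
    have hhd : N ≤ hd.2.length := hrows hd (by simp)
    have hstep : ((acc.zip (hd.2.take N)).map (fun q => q.1 + (K * hd.1) * q.2)).length = N := by
      simp [hlen]; omega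
    rw [List.foldl_cons, ih _ hstep (fun p hp => hrows p (by simp [hp])) j hj]
    have hjacc : j < acc.length := by omega
    have hjz : j < (acc.zip (hd.2.take N)).length := by simp [hlen]; omega
    have hjh : j < hd.2.length := by omega
    have : ((acc.zip (hd.2.take N)).map (fun q => q.1 + (K * hd.1) * q.2)).getD j 0
        = acc.getD j 0 + (K * hd.1) * (hd.2.getD j 0) := by
      rw [List.getD_eq_getElem _ _ (by simpa using hjz), List.getD_eq_getElem _ _ hjacc,
          List.getD_eq_getElem _ _ hjh]
      simp [List.getElem_zip, List.getElem_take]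
    rw [this, List.map_cons, List.sum_cons]
    ring
theorem zip_map_sum_range {α β : Type} (g : α → β → Int) (xs : List α) (ys : List β)
    (d1 : α) (d2 : β) (N : Nat) (hx : xs.length = N) (hy : ys.length = N) :
    ((xs.zip ys).map (fun p => g p.1 p.2)).sum
      = ((List.range N).map (fun k => g (xs.getD k d1) (ys.getD k d2))).sum := by
  congr 1
  apply List.ext_getElem
  · simp [hx, hy]
  · intro k h1 h2
    have hk : k < N := by simpa [hx, hy] using h1
    simp [List.getElem_zip, hx, hy, hk]

theorem matrixB_entry (K : Int) (A F : List (List Int))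
    (hA : ∀ r ∈ A, A.length ≤ r.length) (hF : A.length ≤ F.length)
    (hFr : ∀ r ∈ F.take A.length, A.length ≤ r.length) :
    matrix_operations_alt K A F =
      (List.range A.length).map (fun i => (List.range A.length).map (fun j => pvEntry K A F i j)) := by
  unfold matrix_operations_alt
  simp only
  apply List.map_congr_left
  intro i hi
  have hi' : i < A.length := List.mem_range.mp hi
  set N := A.length with hN
  have hiF : i < F.length := by omega
  have hFi : N ≤ (F.getD i []).length := by
    rw [List.getD_eq_getElem _ _ hiF]
    apply hFr
    have h1 : (F.take N)[i]'(by simp; omega) = F[i] := List.getElem_take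
    exact h1 ▸ List.getElem_mem _
  set G := F.getD i [] with hG
  have hxs : (G.take N).length = N := by simp; omega
  have hfold : ∀ j, j < N →
      ((((G.take N).zip A).foldl (fun acc p =>
          (acc.zip (p.2.take N)).map (fun q => q.1 + (K * p.1) * q.2)) (List.replicate N 0)).getD j 0)
        = (((G.take N).zip A).map (fun p => (K * p.1) * (p.2.getD j 0))).sum := by
    intro j hj
    rw [fold_entry K N _ _ (by simp) (fun p hp => hA p.2 (List.of_mem_zip hp).2) j hj]
    simp
  have hacclen : ((((G.take N).zip A).foldl (fun acc p =>
      (acc.zip (p.2.take N)).map (fun q => q.1 + (K * p.1) * q.2)) (List.replicate N 0)).length = N) := by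
    have : ∀ (ps : List (Int × List Int)) (acc : List Int), acc.length = N →
        (∀ p ∈ ps, N ≤ p.2.length) →
        ((ps.foldl (fun acc p =>
          (acc.zip (p.2.take N)).map (fun q => q.1 + (K * p.1) * q.2)) acc).length) = N := by
      intro ps
      induction ps with
      | nil => intro acc h _; simpa using h
      | cons hd tl ih =>
        intro acc h hr
        rw [List.foldl_cons]
        apply ih
        · have := hr hd (by simp); simp [h]; omega
        · intro p hp; exact hr p (by simp [hp])
    exact this _ _ (by simp) (fun p hp => hA p.2 (List.of_mem_zip hp).2)
  apply List.ext_getElem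
  · simp [hacclen]; omega
  · intro j h1 h2
    have hj : j < N := by simpa using h2
    have hjA : j < A.length := hj
    have hjz : j < ((((G.take N).zip A).foldl (fun acc p =>
        (acc.zip (p.2.take N)).map (fun q => q.1 + (K * p.1) * q.2)) (List.replicate N 0)).length) := by
      omega
    simp only [List.getElem_map, List.getElem_zip, List.getElem_range]
    rw [← List.getD_eq_getElem _ (0:Int) hjz, hfold j hj]
    rw [zip_map_sum_range (fun c r => (K * c) * (r.getD j 0)) _ _ 0 [] N hxs rfl]
    unfold pvEntry pvAt
    congr 1
    · congr 1
      apply List.map_congr_left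
      intro k hk
      have hk' : k < N := List.mem_range.mp hk
      congr 2
      rw [List.getD_eq_getElem _ _ (show k < (G.take N).length by rw [hxs]; omega),
          List.getElem_take, List.getD_eq_getElem _ _ (show k < G.length by omega)]
    · rw [List.getD_eq_getElem _ _ hjA]

-- ===== VERDICT (by name: the statement is the Claim_ definition above) =====
theorem matrix_operations_spec : Claim_equal_matrix_operations := by
  intro K A F _ hpre
  unfold Spec_matrix_operations
  rw [matrixA_entry, matrixB_entry K A F hpre.1 hpre.2.1 hpre.2.2]
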